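-- pv_equiv track=rewrite | github.com/Freshield/LEARN_ACM_Challenge | carl_algorithm/a19_call_money_letter_r.py | call_money_letter
-- ===== SOURCE A (Python) =====
-- def call_money_letter(word1, word2):
--     """
--     赎金信，看word1是否可以用word2来构建
--     1. 构建需要用的字符字典
--     2. 遍历word2，把相应的字符加入
--     3. 遍历word1，如果相应的字符不在，或者字频为0则返回false
--     4. 否则相应的字频减一
--     """
--     # 1. 构建需要用的字符字典
--     word_dict = dict()
--
--     # 2. 遍历word2，把相应的字符加入
--     for word in word2:
--         word_dict[word] = word_dict.get(word, 0) + 1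
--
--     # 3. 遍历word1，如果相应的字符不在，或者字频为0则返回false
--     for word in word1:
--         if word_dict.get(word, 0) == 0:
--             return False
--
--         # 4. 否则相应的字频减一
--         word_dict[word] -= 1
--
--     return True
-- ===== SOURCE B (Python) =====
-- def call_money_letter(word1, word2):
--     # Count-and-compare: for each distinct char of word1, word2 must supply at least as many.
--     return all(word1.count(c) <= word2.count(c) for c in set(word1))
-- ===== Notes on version B (the rewrite author's own statement) =====
-- stated objective: idiomatic
-- what changed: Replaced A's build-a-dict-then-interleaved-decrement-with-early-return by two independent frequency counts compared per distinct character of word1 (all(word1.count(c) <= word2.count(c) for c in set(word1))).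
import Mathlib
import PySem

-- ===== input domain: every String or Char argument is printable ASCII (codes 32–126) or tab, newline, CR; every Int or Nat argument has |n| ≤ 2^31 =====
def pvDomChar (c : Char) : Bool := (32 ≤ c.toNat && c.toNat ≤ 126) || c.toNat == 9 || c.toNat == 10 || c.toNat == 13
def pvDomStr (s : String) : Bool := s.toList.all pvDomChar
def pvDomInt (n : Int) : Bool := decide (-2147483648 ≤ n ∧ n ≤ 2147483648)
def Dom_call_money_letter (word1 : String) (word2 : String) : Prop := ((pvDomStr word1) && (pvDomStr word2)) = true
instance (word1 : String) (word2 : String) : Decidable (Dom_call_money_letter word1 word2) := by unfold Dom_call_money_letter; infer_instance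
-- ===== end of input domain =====

-- B replaces A's dict-build + interleaved decrement/early-return by two independent
-- frequency counts compared per distinct character of word1 (idiomatic; not faster).


-- ===== PORT A =====
-- step 3/4 of A: scan word1, early-return False on a missing/zero count, else decrement
def cmlLoopA : List Char → PySem.Dict Char Int → Bool
  | [], _ => true
  | w :: rest, d =>
      if d.getD w 0 == 0 then false
      else cmlLoopA rest (d.insert w (d.getD w 0 - 1))

def call_money_letter (word1 : String) (word2 : String) : Bool :=
  -- steps 1/2: build the dict of word2's character frequencies
  let word_dict := word2.toList.foldl
    (fun d w => d.insert w (d.getD w 0 + 1)) PySem.Dict.empty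
  cmlLoopA word1.toList word_dict

-- ===== PORT B =====
def call_money_letter_alt (word1 : String) (word2 : String) : Bool :=
  (PySem.Set.ofList word1.toList).all
    (fun c => decide (word1.toList.count c ≤ word2.toList.count c))

-- ===== PRECONDITION & SPEC =====
def Spec_call_money_letter (word1 : String) (word2 : String) (out : Bool) : Prop := out = call_money_letter_alt word1 word2
instance (word1 : String) (word2 : String) (out : Bool) : Decidable (Spec_call_money_letter word1 word2 out) := by unfold Spec_call_money_letter; infer_instance

-- ===== CLAIM (what is proved, stated in full; the proofs are below) =====
def Claim_equal_call_money_letter : Prop := ∀ (word1 : String) (word2 : String), Dom_call_money_letter word1 word2 → Spec_call_money_letter word1 word2 (call_money_letter word1 word2)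

-- ===== LEMMAS AND PROOFS =====

-- A's scanning loop succeeds iff the dict holds at least the multiplicity of every char of l,
-- provided all stored counts are nonnegative.
theorem cmlLoopA_iff (l : List Char) (d : PySem.Dict Char Int)
    (hd : ∀ c, 0 ≤ d.getD c 0) :
    cmlLoopA l d = true ↔ ∀ c, (l.count c : Int) ≤ d.getD c 0 := by
  induction l generalizing d with
  | nil => simp [cmlLoopA]; intro c; exact hd c
  | cons w rest ih =>
    simp only [cmlLoopA]
    by_cases h0 : d.getD w 0 = 0
    · simp [h0]
      refine ⟨w, ?_⟩
      have : (1 : Int) ≤ ((w :: rest).count w : Int) := by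
        simp [List.count_cons_self]
      omega
    · have hne : (d.getD w 0 == 0) = false := by simpa using h0
      rw [hne]
      simp only [Bool.false_eq_true, if_false]
      have hd' : ∀ c, 0 ≤ (d.insert w (d.getD w 0 - 1)).getD c 0 := by
        intro c
        rw [PySem.Dict.getD_insert]
        split_ifs with hc
        · have := hd w; omega
        · exact hd c
      rw [ih _ hd']
      constructor
      · intro h c
        have hc := h c
        rw [PySem.Dict.getD_insert] at hc
        by_cases hcw : c = w
        · subst hcw
          simp at hc
          rw [List.count_cons_self]; push_cast; omega
        · rw [if_neg hcw] at hc
          have : (w :: rest).count c = rest.count c := by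
            simp [List.count_cons]; exact fun h => hcw h.symm
          rw [this]; exact hc
      · intro h c
        have hc := h c
        rw [PySem.Dict.getD_insert]
        by_cases hcw : c = w
        · subst hcw
          simp only [if_pos rfl]
          rw [List.count_cons_self] at hc; push_cast at hc; omega
        · rw [if_neg hcw]
          have : (w :: rest).count c = rest.count c := by
            simp [List.count_cons]; exact fun h => hcw h.symm
          rw [this] at hc; exact hc

theorem cml_eq (word1 word2 : String) :
    call_money_letter word1 word2 = call_money_letter_alt word1 word2 := by
  unfold call_money_letter call_money_letter_alt
  rw [PySem.Dict.foldl_insert_getD_add_one_eq_counter]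
  have hd : ∀ c, 0 ≤ (PySem.Dict.counter word2.toList).getD c 0 := by
    intro c; rw [PySem.Dict.getD_counter]; positivity
  rcases hA : cmlLoopA word1.toList (PySem.Dict.counter word2.toList) with _ | _
  · -- A = false: show B = false
    symm
    rw [List.all_eq_false]
    have := (not_iff_not.mpr (cmlLoopA_iff word1.toList _ hd)).mp (by simp [hA])
    push Not at this
    obtain ⟨c, hc⟩ := this
    rw [PySem.Dict.getD_counter] at hc
    refine ⟨c, ?_, ?_⟩
    · rw [PySem.Set.mem_ofList]
      have : 0 < word1.toList.count c := by omega
      exact List.count_pos_iff.mp this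
    · simpa using (by omega : ¬ word1.toList.count c ≤ word2.toList.count c)
  · -- A = true: show B = true
    symm
    rw [List.all_eq_true]
    have h := (cmlLoopA_iff word1.toList _ hd).mp hA
    intro c _
    have := h c
    rw [PySem.Dict.getD_counter] at this
    simpa using (by exact_mod_cast this : word1.toList.count c ≤ word2.toList.count c)

-- ===== VERDICT (by name: the statement is the Claim_ definition above) =====
theorem call_money_letter_spec : Claim_equal_call_money_letter := by
  intro word1 word2 _
  exact cml_eq word1 word2
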